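-- pv_equiv track=rewrite | github.com/lars-reimann/python-analyzer | library_analyzer/analyze_public_api.py | _init_files_first
-- ===== SOURCE A (Python) =====
-- def _init_files_first(files: list[str]) -> list[str]:
--     init_files = []
--     other_files = []
--
--     for file in files:
--         if file.endswith("__init__.py"):
--             init_files.append(file)
--         else:
--             other_files.append(file)
--
--     return init_files + other_files
-- ===== SOURCE B (Python) =====
-- def _init_files_first(files: list[str]) -> list[str]:
--     return sorted(files, key=lambda file: not file.endswith("__init__.py"))
-- ===== Notes on version B (the rewrite author's own statement) =====
-- stated objective: idiomatic
-- what changed: Replaces the two-accumulator partition loop with a single stable sort on the boolean key 'not file.endswith("__init__.py")'; stability puts init files first and preserves within-group order.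
import Mathlib
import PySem

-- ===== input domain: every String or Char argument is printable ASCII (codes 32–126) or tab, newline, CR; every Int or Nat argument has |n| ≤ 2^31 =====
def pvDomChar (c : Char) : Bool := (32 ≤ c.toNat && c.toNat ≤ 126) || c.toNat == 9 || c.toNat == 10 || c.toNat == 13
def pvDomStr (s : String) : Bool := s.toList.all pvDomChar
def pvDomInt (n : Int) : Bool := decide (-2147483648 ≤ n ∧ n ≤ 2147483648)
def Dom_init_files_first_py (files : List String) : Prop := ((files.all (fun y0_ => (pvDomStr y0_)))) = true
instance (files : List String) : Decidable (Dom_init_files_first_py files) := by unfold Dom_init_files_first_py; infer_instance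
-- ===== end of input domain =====

-- B replaces A's two-accumulator partition loop by a single stable sort on the key
-- 'not file.endswith("__init__.py")' (idiomatic; same return value, proved below).

-- ===== PORT A =====
def init_files_first_py (files : List String) : List String :=
  let p := files.foldl
    (fun (acc : List String × List String) file =>
      if PySem.Str.endswith file "__init__.py" then (acc.1 ++ [file], acc.2)
      else (acc.1, acc.2 ++ [file]))
    ([], [])
  p.1 ++ p.2

-- ===== PORT B =====
def init_files_first_py_alt (files : List String) : List String :=
  PySem.List.sorted files (fun file => !PySem.Str.endswith file "__init__.py") false

-- ===== PRECONDITION & SPEC =====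
def Spec_init_files_first_py (files : List String) (out : List String) : Prop := out = init_files_first_py_alt files
instance (files : List String) (out : List String) : Decidable (Spec_init_files_first_py files out) := by unfold Spec_init_files_first_py; infer_instance

-- ===== CLAIM (what is proved, stated in full; the proofs are below) =====
def Claim_equal_init_files_first_py : Prop := ∀ (files : List String), Dom_init_files_first_py files → Spec_init_files_first_py files (init_files_first_py files)

-- ===== LEMMAS AND PROOFS =====

-- The two branch bodies of A's loop, named so the pair fold splits into two folds.
def pvGoInit (a : List String) (f : String) : List String :=
  if PySem.Str.endswith f "__init__.py" then a ++ [f] else a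
def pvGoOther (b : List String) (f : String) : List String :=
  if !PySem.Str.endswith f "__init__.py" then b ++ [f] else b

-- On Bool keys, 'before' is decided by the two key values.
lemma bef_of_true {α : Type} (key : α → Bool) (x y : α) (hx : key x = true) :
    decide (key x < key y) = false := by
  simp [Bool.lt_iff, hx]

lemma bef_of_false_false {α : Type} (key : α → Bool) (x y : α)
    (hy : key y = false) : decide (key x < key y) = false := by
  simp [Bool.lt_iff, hy]

lemma bef_of_false_true {α : Type} (key : α → Bool) (x y : α) (hx : key x = false)
    (hy : key y = true) : decide (key x < key y) = true := by
  simp [Bool.lt_iff, hx, hy]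

-- Inserting x when it is not 'before' any element of l appends it at the end.
lemma insertBy_all_false {α : Type} (bef : α → α → Bool) (x : α) (l : List α)
    (h : ∀ y ∈ l, bef x y = false) :
    PySem.List.insertBy bef x l = l ++ [x] := by
  induction l with
  | nil => simp [PySem.List.insertBy]
  | cons y ys ih =>
    simp only [PySem.List.insertBy, h y (by simp), Bool.false_eq_true, if_false,
      List.cons_append, List.cons.injEq, true_and]
    exact ih (fun z hz => h z (by simp [hz]))

-- Inserting x into A ++ B, passing A (not before any of it) and landing at the head of B.
lemma insertBy_split {α : Type} (bef : α → α → Bool) (x : α) (A B : List α)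
    (hA : ∀ y ∈ A, bef x y = false) (hB : ∀ y ∈ B, bef x y = true) :
    PySem.List.insertBy bef x (A ++ B) = A ++ x :: B := by
  induction A with
  | nil =>
    cases B with
    | nil => simp [PySem.List.insertBy]
    | cons b bs => simp [PySem.List.insertBy, hB b (by simp)]
  | cons a as ih =>
    simp only [List.cons_append, PySem.List.insertBy, hA a (by simp), Bool.false_eq_true,
      if_false, List.cons.injEq, true_and]
    exact ih (fun z hz => hA z (by simp [hz]))

-- Stable sort on a boolean key is the partition: key-false elements first, in order.
lemma sorted_bool_key {α : Type} (key : α → Bool) (xs : List α) :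
    PySem.List.sorted xs key false = xs.filter (fun x => !key x) ++ xs.filter key := by
  simp only [PySem.List.sorted, Bool.false_eq_true, if_false]
  induction xs using List.reverseRecOn with
  | nil => simp
  | append_singleton xs x ih =>
    rw [List.foldl_append, List.foldl_cons, List.foldl_nil, ih]
    by_cases hx : key x = true
    · rw [insertBy_all_false _ x _ ?_, List.filter_append, List.filter_append]
      · simp [hx, List.append_assoc]
      · intro y hy
        simp only [List.mem_append, List.mem_filter] at hy
        exact bef_of_true key x y hx
    · rw [insertBy_split _ x _ _ ?_ ?_, List.filter_append, List.filter_append]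
      · simp [hx]
      · intro y hy
        simp only [List.mem_filter, Bool.not_eq_eq_eq_not, Bool.not_true] at hy
        exact bef_of_false_false key x y hy.2
      · intro y hy
        simp only [List.mem_filter] at hy
        exact bef_of_false_true key x y (Bool.not_eq_true _ ▸ hx) hy.2

-- A's loop computes the two filters.
lemma a_loop_filters (files : List String) :
    files.foldl
      (fun (acc : List String × List String) file =>
        if PySem.Str.endswith file "__init__.py" then (acc.1 ++ [file], acc.2)
        else (acc.1, acc.2 ++ [file]))
      ([], [])
    = (files.filter (fun f => PySem.Str.endswith f "__init__.py"),
       files.filter (fun f => !PySem.Str.endswith f "__init__.py")) := by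
  have h : (fun (acc : List String × List String) file =>
      if PySem.Str.endswith file "__init__.py" then (acc.1 ++ [file], acc.2)
      else (acc.1, acc.2 ++ [file]))
    = (fun (acc : List String × List String) file => (pvGoInit acc.1 file, pvGoOther acc.2 file)) := by
    funext acc file
    cases hq : PySem.Str.endswith file "__init__.py" <;>
      simp [pvGoInit, pvGoOther, hq, -PySem.Str.endswith_eq]
  rw [h, PySem.List.foldl_prod_mk pvGoInit pvGoOther]
  unfold pvGoInit pvGoOther
  rw [PySem.List.foldl_append_if (fun f => PySem.Str.endswith f "__init__.py") (fun f => f),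
      PySem.List.foldl_append_if (fun f => !PySem.Str.endswith f "__init__.py") (fun f => f)]
  simp

-- ===== VERDICT (by name: the statement is the Claim_ definition above) =====
theorem init_files_first_py_spec : Claim_equal_init_files_first_py := by
  intro files _
  unfold Spec_init_files_first_py init_files_first_py init_files_first_py_alt
  rw [sorted_bool_key, a_loop_filters]
  simp
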